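-- pv_equiv track=rewrite | github.com/eliottcassidy2000/math | 04-computation/det_m_general_formula.py | independence_polynomial
-- ===== SOURCE A (Python) =====
-- def independence_polynomial(cycles, n):
--     """Compute I(Omega, x) where Omega has cycles as vertices."""
--     cycle_list = list(cycles)
--     m = len(cycle_list)
--     # Find independent sets
--     coeffs = [0] * (m + 1)
--     for mask in range(1 << m):
--         subset = [cycle_list[k] for k in range(m) if mask & (1 << k)]
--         # Check pairwise vertex-disjoint
--         independent = True
--         vertices = set()
--         for c in subset:
--             if vertices & c:
--                 independent = False
--                 break
--             vertices |= c
--         if independent: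
--             coeffs[len(subset)] += 1
--     return coeffs
-- ===== SOURCE B (Python) =====
-- def independence_polynomial(cycles, n):
--     """Compute I(Omega, x) by branching on the first cycle instead of
--     enumerating all 2^m subsets: the result for head::rest is the result
--     for rest (head not chosen) plus x times the result for the cycles of
--     rest disjoint from head (head chosen)."""
--     def go(lst):
--         if not lst:
--             return [1]
--         head, rest = lst[0], lst[1:]
--         without = go(rest)
--         withh = go([c for c in rest if c.isdisjoint(head)])
--         withh = [0] + withh + [0] * (len(without) - len(withh))
--         return [a + b for a, b in zip(without + [0], withh)]
--     return go(list(cycles))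
-- ===== Notes on version B (the rewrite author's own statement) =====
-- stated objective: faster
-- what changed: Replaces the exhaustive enumeration of all 2^m bitmask subsets (each rebuilt and re-checked for pairwise disjointness) by a branch-and-combine recursion on the cycle list: the polynomial for head::rest is poly(rest) plus x*poly(cycles of rest disjoint from head), which never visits a subset containing a conflicting pair.
import Mathlib
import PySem

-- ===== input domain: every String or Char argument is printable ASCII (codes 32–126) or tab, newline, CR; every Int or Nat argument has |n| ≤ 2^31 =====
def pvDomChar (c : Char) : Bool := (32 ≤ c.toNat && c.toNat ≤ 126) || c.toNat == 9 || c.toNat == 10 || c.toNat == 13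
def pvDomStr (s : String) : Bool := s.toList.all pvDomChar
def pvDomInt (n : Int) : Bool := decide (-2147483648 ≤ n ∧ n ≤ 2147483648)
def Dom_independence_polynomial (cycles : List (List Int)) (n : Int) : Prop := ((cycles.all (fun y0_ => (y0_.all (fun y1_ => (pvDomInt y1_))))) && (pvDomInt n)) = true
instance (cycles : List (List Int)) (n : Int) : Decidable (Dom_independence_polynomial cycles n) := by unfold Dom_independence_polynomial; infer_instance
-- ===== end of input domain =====

-- B replaces A's enumeration of all 2^m subsets by a branch-and-combine recursion
-- on the cycle list (objective: faster — it skips every subset containing a conflicting pair).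
-- The Python arguments are sets of ints, modelled as duplicate-free List Int values.

-- ===== PORT A =====
-- inner loop 'for c in subset: if vertices & c: ... vertices |= c' with early break
def pvIndepLoop : List (List Int) → PySem.Set Int → Bool
  | [], _ => true
  | c :: subset, vertices =>
      if !(PySem.Set.inter vertices c).isEmpty then false
      else pvIndepLoop subset (PySem.Set.update vertices c)

def independence_polynomial (cycles : List (List Int)) (n : Int) : List Int :=
  let cycle_list := cycles
  let m := cycle_list.length
  let coeffs := List.replicate (m + 1) (0 : Int)
  (PySem.List.pyRange 0 ((2 : Int) ^ m) 1).foldl (fun coeffs mask =>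
    -- [cycle_list[k] for k in range(m) if mask & (1 << k)]  (k ∈ range(m) is in range, so pyGetD)
    let subset := ((PySem.List.pyRange 0 (m : Int) 1).filter
        (fun k => !(PySem.Int.band mask ((2 : Int) ^ k.toNat) == 0))).map
        (fun k => PySem.List.pyGetD cycle_list k [])
    let independent := pvIndepLoop subset PySem.Set.empty
    if independent then
      PySem.List.pySetD coeffs (subset.length : Int)
        (PySem.List.pyGetD coeffs (subset.length : Int) 0 + 1)
    else coeffs) coeffs

-- ===== PORT B =====
def pvGo : List (List Int) → List Int
  | [] => [1]
  | head :: rest =>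
      let without := pvGo rest
      let withh := pvGo (rest.filter (fun c => PySem.Set.isdisjoint c head))
      let withh' := [(0 : Int)] ++ withh ++ List.replicate (without.length - withh.length) (0 : Int)
      ((without ++ [0]).zip withh').map (fun (p : Int × Int) => p.1 + p.2)
  termination_by l => l.length
  decreasing_by
    · simp
    · simpa using Nat.lt_succ_of_le (List.length_filter_le _ _)

def independence_polynomial_alt (cycles : List (List Int)) (n : Int) : List Int :=
  pvGo cycles

-- ===== PRECONDITION & SPEC =====
def Spec_independence_polynomial (cycles : List (List Int)) (n : Int) (out : List Int) : Prop := out = independence_polynomial_alt cycles n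
instance (cycles : List (List Int)) (n : Int) (out : List Int) : Decidable (Spec_independence_polynomial cycles n out) := by unfold Spec_independence_polynomial; infer_instance

-- ===== CLAIM (what is proved, stated in full; the proofs are below) =====
def Claim_equal_independence_polynomial : Prop := ∀ (cycles : List (List Int)) (n : Int), Dom_independence_polynomial cycles n → Spec_independence_polynomial cycles n (independence_polynomial cycles n)

-- ===== LEMMAS AND PROOFS =====

-- proof-side vocabulary --------------------------------------------------

-- Bool disjointness, orientation ∀ x ∈ c, x ∉ d
def pvDisj (c d : List Int) : Bool := PySem.Set.isdisjoint c d

-- pairwise disjointness of a list of cycles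
def pvIndep : List (List Int) → Bool
  | [] => true
  | c :: l => (l.all (fun d => pvDisj c d)) && pvIndep l

def pvQ (s : Nat) (sub : List (List Int)) : Bool := pvIndep sub && sub.length == s

-- all subsequences, head bit least significant
def subsOf : List (List Int) → List (List (List Int))
  | [] => [[]]
  | a :: l => subsOf l ++ (subsOf l).map (a :: ·)

-- the common specification: coefficient s counts the independent subsequences of size s
def pvSpec (l : List (List Int)) : List Int :=
  (List.range (l.length + 1)).map (fun s => ((subsOf l).countP (pvQ s) : Int))

-- subset selected by a bitmask, structurally
def recSub : List (List Int) → Nat → List (List Int)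
  | [], _ => []
  | a :: l, t => (if t % 2 = 1 then [a] else []) ++ recSub l (t / 2)

-- basic facts ------------------------------------------------------------

theorem pvDisj_comm (c d : List Int) : pvDisj c d = pvDisj d c := by
  unfold pvDisj; rw [Bool.eq_iff_iff]
  simp only [PySem.Set.isdisjoint_iff]
  constructor <;> intro h x hx hy <;> exact h _ hy hx

theorem length_le_of_mem_subsOf {sub : List (List Int)} {l : List (List Int)}
    (h : sub ∈ subsOf l) : sub.length ≤ l.length := by
  induction l generalizing sub with
  | nil => simp [subsOf] at h; simp [h]
  | cons a l ih =>
    simp only [subsOf, List.mem_append, List.mem_map] at h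
    rcases h with h | ⟨s, hs, rfl⟩
    · exact le_trans (ih h) (Nat.le_succ _)
    · simpa using ih hs

theorem countP_subsOf_big {l : List (List Int)} {s : Nat} (h : l.length < s) :
    (subsOf l).countP (pvQ s) = 0 := by
  rw [List.countP_eq_zero]
  intro sub hsub
  have := length_le_of_mem_subsOf hsub
  simp [pvQ]; omega

theorem countP_subsOf_filter (p : List Int → Bool) (l : List (List Int))
    (R : List (List Int) → Bool) :
    (subsOf (l.filter p)).countP R = (subsOf l).countP (fun sub => sub.all p && R sub) := by
  induction l generalizing R with
  | nil => simp [subsOf]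
  | cons a l ih =>
    by_cases hp : p a = true
    · rw [List.filter_cons_of_pos hp]
      simp only [subsOf, List.countP_append, List.countP_map]
      rw [ih, ih]
      congr 1
      apply List.countP_congr
      intro sub _
      simp [Function.comp, hp]
    · rw [List.filter_cons_of_neg (by simp [hp])]
      simp only [subsOf, List.countP_append, List.countP_map]
      rw [ih]
      have h0 : (subsOf l).countP ((fun sub => sub.all p && R sub) ∘ (a :: ·)) = 0 := by
        rw [List.countP_eq_zero]
        intro sub _
        simp [Function.comp, hp]
      omega

-- A-side -----------------------------------------------------------------

theorem pvIndepLoop_eq (sub : List (List Int)) :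
    ∀ vs : PySem.Set Int,
      pvIndepLoop sub vs = ((sub.all (fun c => PySem.Set.isdisjoint vs c)) && pvIndep sub) := by
  induction sub with
  | nil => intro vs; simp [pvIndepLoop, pvIndep]
  | cons c sub ih =>
    intro vs
    by_cases h : PySem.Set.isdisjoint vs c = true
    · have hi : (!(PySem.Set.inter vs c).isEmpty) = false := by
        simp only [PySem.Set.isdisjoint_iff] at h
        simp [PySem.Set.inter, List.filter_eq_nil_iff]
        intro x hx
        simpa using h x hx
      rw [pvIndepLoop, hi, if_neg (by simp), ih]
      rw [Bool.eq_iff_iff]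
      simp only [pvIndep, List.all_cons, Bool.and_eq_true, List.all_eq_true, pvDisj,
        PySem.Set.isdisjoint_iff, PySem.Set.mem_update]
      constructor
      · rintro ⟨hall, hrest⟩
        exact ⟨⟨fun x hx => (PySem.Set.isdisjoint_iff _ _).mp h x hx, fun d hd x hx => hall d hd x (Or.inl hx)⟩,
               fun d hd x hx => hall d hd x (Or.inr hx), hrest⟩
      · rintro ⟨⟨_, hvs⟩, hc, hrest⟩
        refine ⟨fun d hd x hx => ?_, hrest⟩
        rcases hx with hx | hx
        · exact hvs d hd x hx
        · exact hc d hd x hx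
    · have hi : (!(PySem.Set.inter vs c).isEmpty) = true := by
        simp only [PySem.Set.isdisjoint_iff] at h
        push Not at h
        obtain ⟨x, hx, hxc⟩ := h
        simp [PySem.Set.inter, List.filter_eq_nil_iff]
        exact ⟨x, hx, by simpa using hxc⟩
      rw [pvIndepLoop, hi, if_pos rfl]
      simp [List.all_cons, h]

theorem recSub_length_le (l : List (List Int)) (t : Nat) : (recSub l t).length ≤ l.length := by
  induction l generalizing t with
  | nil => simp [recSub]
  | cons a l ih =>
    simp only [recSub, List.length_append, List.length_cons]
    have := ih (t / 2)
    split <;> simp <;> omega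

theorem bitTest (t k : Nat) : (!(PySem.Int.band (t : Int) ((2:Int) ^ k) == 0)) = t.testBit k := by
  have h2 : ((2:Int)^k) = ((2^k : Nat) : Int) := by push_cast; ring
  rw [h2, PySem.Int.band_natCast, Nat.and_two_pow]
  rcases Bool.eq_false_or_eq_true (t.testBit k) with h | h <;> simp [h]

theorem subsetA_aux (cl : List (List Int)) (t : Nat) :
    ((List.range cl.length).filter (fun k => t.testBit k)).map
      (fun (k : Nat) => PySem.List.pyGetD cl (k : Int) []) = recSub cl t := by
  induction cl generalizing t with
  | nil => simp [recSub]
  | cons a cl ih =>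
    have hsucc : ((fun k => t.testBit k) ∘ Nat.succ) = fun k => (t/2).testBit k := by
      funext k
      simp [Function.comp, Nat.testBit_add_one]
    rw [List.length_cons, List.range_succ_eq_map, List.filter_cons, List.filter_map, hsucc]
    have hmap : ((fun (k : Nat) => PySem.List.pyGetD (a :: cl) (k : Int) []) ∘ Nat.succ)
        = fun (k : Nat) => PySem.List.pyGetD cl (k : Int) [] := by
      funext k
      simp only [Function.comp]
      rw [PySem.List.pyGetD_natCast, PySem.List.pyGetD_natCast]
      simp [List.getD]
    rw [Nat.testBit_zero]
    by_cases hp : t % 2 = 1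
    · rw [if_pos (by simpa using hp)]
      rw [List.map_cons, List.map_map, hmap, ih]
      simp [recSub, hp, PySem.List.pyGetD_natCast]
    · rw [if_neg (by simpa using hp)]
      rw [List.map_map, hmap, ih]
      simp [recSub, hp]

theorem subsetA_eq (cl : List (List Int)) (t : Nat) :
    ((PySem.List.pyRange 0 (cl.length : Int) 1).filter
        (fun k => !(PySem.Int.band (t : Int) ((2 : Int) ^ k.toNat) == 0))).map
        (fun k => PySem.List.pyGetD cl k []) = recSub cl t := by
  rw [PySem.List.pyRange_zero_nat, List.filter_map, List.map_map]
  rw [List.filter_congr (l := List.range cl.length)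
    (q := fun k => t.testBit k) (fun k _ => by
      simp only [Function.comp, Int.toNat_natCast]
      rw [bitTest])]
  rw [← subsetA_aux cl t]
  rfl

theorem range_two_mul_perm (K : Nat) :
    (List.range (2 * K)).Perm
      (((List.range K).map (fun t => 2 * t)) ++ ((List.range K).map (fun t => 2 * t + 1))) := by
  induction K with
  | zero => simp
  | succ K ih =>
    have h1 : 2 * (K + 1) = 2 * K + 1 + 1 := by ring
    rw [h1, List.range_succ, List.range_succ, List.range_succ]
    rw [List.map_append, List.map_append]
    simp only [List.map_singleton]
    refine ((ih.append_right [2*K]).append_right [2*K+1]).trans ?_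
    rw [← Multiset.coe_eq_coe]
    simp only [← Multiset.coe_add]
    abel

theorem map_recSub_perm (cl : List (List Int)) :
    ((List.range (2 ^ cl.length)).map (recSub cl)).Perm (subsOf cl) := by
  induction cl with
  | nil => simp [recSub, subsOf]
  | cons a cl ih =>
    have h2 : 2 ^ (a :: cl).length = 2 * 2 ^ cl.length := by
      simp [List.length_cons, pow_succ]; ring
    rw [h2]
    refine ((range_two_mul_perm _).map (recSub (a :: cl))).trans ?_
    rw [List.map_append, List.map_map, List.map_map]
    have he : (recSub (a :: cl) ∘ fun t => 2 * t) = recSub cl := by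
      funext t
      simp [recSub, Function.comp, Nat.mul_div_cancel_left, Nat.mul_mod_right]
    have ho : (recSub (a :: cl) ∘ fun t => 2 * t + 1) = (a :: ·) ∘ recSub cl := by
      funext t
      have : (2 * t + 1) / 2 = t := by omega
      have hm : (2 * t + 1) % 2 = 1 := by omega
      simp [recSub, Function.comp, this, hm]
    rw [he, ho, ← List.map_map]
    exact (ih.append (ih.map _))

theorem foldCoeffs (p : Nat → Bool) (sz : Nat → Nat) :
    ∀ (ts : List Nat) (co : List Int), (∀ t ∈ ts, sz t < co.length) →
      (ts.foldl (fun co t => if p t then co.set (sz t) (co.getD (sz t) 0 + 1) else co) co).length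
          = co.length ∧
      ∀ j (hj : j < co.length),
        (ts.foldl (fun co t => if p t then co.set (sz t) (co.getD (sz t) 0 + 1) else co) co).getD j 0
          = co.getD j 0 + (ts.countP (fun t => p t && sz t == j) : Int) := by
  intro ts
  induction ts with
  | nil => intro co _; simp
  | cons t ts ih =>
    intro co hlt
    have htc : sz t < co.length := hlt t (by simp)
    set co' := if p t then co.set (sz t) (co.getD (sz t) 0 + 1) else co with hco'
    have hlen' : co'.length = co.length := by
      rw [hco']; split <;> simp
    have hrec := ih co' (by rw [hlen']; intro u hu; exact hlt u (by simp [hu]))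
    rw [List.foldl_cons, ← hco']
    refine ⟨by rw [hrec.1, hlen'], ?_⟩
    intro j hj
    rw [hrec.2 j (by omega)]
    have hcount : (List.countP (fun u => p u && sz u == j) (t :: ts) : Int)
        = (if p t && sz t == j then 1 else 0) + (List.countP (fun u => p u && sz u == j) ts : Int) := by
      rw [List.countP_cons]
      split <;> simp_all <;> push_cast <;> ring
    rw [hcount]
    have hget : co'.getD j 0 = co.getD j 0 + (if p t && sz t == j then 1 else 0) := by
      rw [hco']
      by_cases hp : p t
      · rw [if_pos hp]
        by_cases hjj : j = sz t
        · subst hjj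
          rw [List.getD_eq_getElem?_getD, List.getElem?_set_self (by omega)]
          simp [hp, List.getD_eq_getElem?_getD, List.getElem?_eq_getElem hj]
        · rw [List.getD_eq_getElem?_getD, List.getElem?_set_ne (by omega)]
          simp [hp, hjj, List.getD_eq_getElem?_getD]
          intro h; omega
      · simp [hp]
    rw [hget]; ring

theorem countP_subsOf_cons (h : List Int) (rest : List (List Int)) (j : Nat) :
    (subsOf (h :: rest)).countP (pvQ j)
      = (subsOf rest).countP (pvQ j)
        + (if j = 0 then 0
           else (subsOf (rest.filter (fun c => pvDisj c h))).countP (pvQ (j - 1))) := by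
  rw [show subsOf (h :: rest) = subsOf rest ++ (subsOf rest).map (h :: ·) from rfl]
  rw [List.countP_append]
  congr 1
  rw [List.countP_map]
  by_cases hj : j = 0
  · subst hj
    rw [if_pos rfl, List.countP_eq_zero]
    intro sub _
    simp [Function.comp, pvQ]
  · rw [if_neg hj, countP_subsOf_filter]
    apply List.countP_congr
    intro sub _
    simp only [Function.comp, pvQ]
    rw [show pvIndep (h :: sub) = ((sub.all (fun d => pvDisj h d)) && pvIndep sub) from rfl]
    have hall : (sub.all fun d => pvDisj h d) = (sub.all fun d => pvDisj d h) := by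
      rw [Bool.eq_iff_iff, List.all_eq_true, List.all_eq_true]
      exact ⟨fun hh d hd => by rw [← pvDisj_comm]; exact hh d hd,
             fun hh d hd => by rw [pvDisj_comm]; exact hh d hd⟩
    rw [hall]
    have hlen : (sub.length + 1 == j) = (sub.length == j - 1) := by
      rw [Bool.eq_iff_iff]
      simp only [beq_iff_eq]
      omega
    rw [show (h :: sub).length = sub.length + 1 from rfl, hlen]
    rw [Bool.eq_iff_iff]
    simp only [Bool.and_eq_true]
    tauto

theorem portA_eq_spec (cycles : List (List Int)) (n : Int) :
    independence_polynomial cycles n = pvSpec cycles := by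
  unfold independence_polynomial
  simp only []
  rw [show PySem.List.pyRange 0 ((2:Int) ^ cycles.length) 1
        = (List.range (2 ^ cycles.length)).map Nat.cast from by
      rw [show ((2:Int) ^ cycles.length) = ((2 ^ cycles.length : Nat) : Int) by push_cast; ring]
      exact PySem.List.pyRange_zero_nat _]
  rw [List.foldl_map]
  have hbody : ∀ (co : List Int) (t : Nat),
      (fun (coeffs : List Int) (mask : Int) =>
        let subset := ((PySem.List.pyRange 0 (cycles.length : Int) 1).filter
            (fun k => !(PySem.Int.band mask ((2 : Int) ^ k.toNat) == 0))).map
            (fun k => PySem.List.pyGetD cycles k [])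
        let independent := pvIndepLoop subset PySem.Set.empty
        if independent then
          PySem.List.pySetD coeffs (subset.length : Int)
            (PySem.List.pyGetD coeffs (subset.length : Int) 0 + 1)
        else coeffs) co (t : Int)
      = if pvIndep (recSub cycles t) then
          co.set (recSub cycles t).length (co.getD (recSub cycles t).length 0 + 1)
        else co := by
    intro co t
    simp only [subsetA_eq, PySem.List.pySetD_natCast, PySem.List.pyGetD_natCast]
    have hloop : pvIndepLoop (recSub cycles t) PySem.Set.empty = pvIndep (recSub cycles t) := by
      rw [pvIndepLoop_eq]
      have : (recSub cycles t).all (fun c => PySem.Set.isdisjoint PySem.Set.empty c) = true := by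
        rw [List.all_eq_true]
        intro c _
        rw [PySem.Set.isdisjoint_iff]
        intro x hx
        simp [PySem.Set.empty] at hx
      rw [this, Bool.true_and]
    rw [hloop]
  rw [List.foldl_ext _ _ _ (fun co t _ => hbody co t)]
  have hmain := foldCoeffs (fun t => pvIndep (recSub cycles t)) (fun t => (recSub cycles t).length)
    (List.range (2 ^ cycles.length)) (List.replicate (cycles.length + 1) 0)
    (by intro t _; simp only [List.length_replicate]
        exact Nat.lt_succ_of_le (recSub_length_le cycles t))
  apply List.ext_getElem
  · rw [hmain.1]
    simp [pvSpec]
  · intro j hj1 hj2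
    have hjlen : j < cycles.length + 1 := by
      simpa [pvSpec] using hj2
    have hval := hmain.2 j (by simpa using hjlen)
    rw [List.getD_eq_getElem?_getD, List.getElem?_eq_getElem hj1] at hval
    simp only [Option.getD_some] at hval
    rw [hval]
    have hcnt : (List.range (2 ^ cycles.length)).countP
        (fun t => pvIndep (recSub cycles t) && (recSub cycles t).length == j)
        = (subsOf cycles).countP (pvQ j) := by
      rw [show (fun t => pvIndep (recSub cycles t) && (recSub cycles t).length == j)
            = (pvQ j) ∘ (recSub cycles) from rfl]
      rw [← List.countP_map]
      exact (map_recSub_perm cycles).countP_eq _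
    rw [hcnt]
    simp [pvSpec, List.getD_replicate, hjlen]

theorem length_pvSpec (l : List (List Int)) : (pvSpec l).length = l.length + 1 := by
  simp [pvSpec]

theorem getElem_pvSpec (l : List (List Int)) (j : Nat) (hj : j < l.length + 1) :
    (pvSpec l)[j]'(by rw [length_pvSpec]; exact hj) = ((subsOf l).countP (pvQ j) : Int) := by
  simp [pvSpec]

theorem pvGo_eq_spec (l : List (List Int)) : pvGo l = pvSpec l := by
  induction l using pvGo.induct with
  | case1 => simp [pvGo, pvSpec, subsOf, pvQ, pvIndep]
  | case2 head rest ih1 ih2 =>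
    rw [pvGo]
    simp only [List.unattach_filter, List.unattach_attach] at ih2
    rw [show (fun c => PySem.Set.isdisjoint c head) = (fun c => pvDisj c head) from rfl] at ih2 ⊢
    rw [ih1, ih2]
    have hfl : (rest.filter (fun c => pvDisj c head)).length ≤ rest.length :=
      List.length_filter_le _ _
    have hlw : (pvSpec rest).length = rest.length + 1 := length_pvSpec rest
    have hlh : (pvSpec (rest.filter (fun c => pvDisj c head))).length
        = (rest.filter (fun c => pvDisj c head)).length + 1 := length_pvSpec _
    have hlen2 : ([(0:Int)] ++ pvSpec (rest.filter (fun c => pvDisj c head))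
        ++ List.replicate ((pvSpec rest).length - (pvSpec (rest.filter (fun c => pvDisj c head))).length) (0:Int)).length
        = rest.length + 2 := by
      simp only [List.length_append, List.length_cons, List.length_nil, List.length_replicate,
        hlw, hlh]
      omega
    apply List.ext_getElem
    · simp only [List.length_map, List.length_zip, List.length_append, List.length_cons,
        List.length_nil, hlw, length_pvSpec, hlen2]
      simp [List.length_replicate, hlh, hlw]
      omega
    · intro j hj1 hj2
      have hjr : j < rest.length + 2 := by
        rw [length_pvSpec] at hj2; simp at hj2; omega
      rw [List.getElem_map, List.getElem_zip]
      have hA1 : ∀ (hp : j < (pvSpec rest ++ [(0:Int)]).length),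
          ((pvSpec rest) ++ [(0:Int)])[j]'hp
          = ((subsOf rest).countP (pvQ j) : Int) := by
        intro hp
        by_cases hc : j < rest.length + 1
        · rw [List.getElem_append_left (by omega)]
          exact getElem_pvSpec rest j hc
        · have hje : j = rest.length + 1 := by omega
          rw [List.getElem_append_right (by omega)]
          subst hje
          simp [hlw, countP_subsOf_big (Nat.lt_succ_self _)]
      have hA2 : ∀ (hp : j < ([(0:Int)] ++ pvSpec (rest.filter (fun c => pvDisj c head))
            ++ List.replicate ((pvSpec rest).length - (pvSpec (rest.filter (fun c => pvDisj c head))).length) (0:Int)).length),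
          ([(0:Int)] ++ pvSpec (rest.filter (fun c => pvDisj c head))
            ++ List.replicate ((pvSpec rest).length - (pvSpec (rest.filter (fun c => pvDisj c head))).length) (0:Int))[j]'hp
          = (if j = 0 then 0
             else ((subsOf (rest.filter (fun c => pvDisj c head))).countP (pvQ (j-1)) : Int)) := by
        intro hp
        by_cases hc0 : j = 0
        · subst hc0
          rw [List.getElem_append_left (by simp)]
          rw [List.getElem_append_left (by simp)]
          simp
        · rw [if_neg hc0]
          by_cases hc1 : j - 1 < (rest.filter (fun c => pvDisj c head)).length + 1
          · rw [List.getElem_append_left (by simp [hlh]; omega)]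
            rw [List.getElem_append_right (h₁ := by simp; omega)]
            have := getElem_pvSpec (rest.filter (fun c => pvDisj c head)) (j-1) hc1
            simpa [show j - List.length [(0:Int)] = j - 1 by simp] using this
          · rw [List.getElem_append_right (h₁ := by simp [hlh]; omega)]
            rw [List.getElem_replicate]
            rw [countP_subsOf_big (by omega)]
            simp
      rw [hA1, hA2]
      have hcons := countP_subsOf_cons head rest j
      have hspec := getElem_pvSpec (head :: rest) j (by simp; omega)
      rw [hspec, hcons]
      push_cast
      by_cases hc0 : j = 0 <;> simp [hc0]

-- ===== VERDICT (by name: the statement is the Claim_ definition above) =====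
theorem independence_polynomial_spec : Claim_equal_independence_polynomial := by
  intro cycles n _
  unfold Spec_independence_polynomial independence_polynomial_alt
  rw [portA_eq_spec, pvGo_eq_spec]
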